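-- pv_equiv track=rewrite | github.com/rdeits/cryptics | python/utils/phrasings.py | phrasings
-- ===== SOURCE A (Python) =====
-- def phrasings(remaining):
--     if len(remaining) <= 1:
--         return [remaining]
--     else:
--         new_active_set = []
--         for i in range(len(remaining)):
--             new_phrase = '_'.join(remaining[:i + 1])
--             new_remaining = remaining[i + 1:]
--             for new_s in phrasings(new_remaining):
--                 new_active_set.append([new_phrase] + new_s)
--         return new_active_set
-- ===== SOURCE B (Python) =====
-- def phrasings(remaining):
--     # Enumerate gap-cut bitmasks (gap 0 = most significant bit) from high to low;
--     # each mask yields one partition into '_'-joined consecutive groups.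
--     if not remaining:
--         return [remaining]
--
--     def build(cur, rest, mask):
--         if not rest:
--             return [cur]
--         x, xs = rest[0], rest[1:]
--         if (mask >> len(xs)) & 1:
--             return [cur] + build(x, xs, mask)
--         return build(cur + '_' + x, xs, mask)
--
--     return [build(remaining[0], remaining[1:], mask)
--             for mask in reversed(range(2 ** (len(remaining) - 1)))]
-- ===== Notes on version B (the rewrite author's own statement) =====
-- stated objective: alternative
-- what changed: Replaces A's recursion over all suffix partitions (re-joining prefixes at every level) with a direct enumeration of gap-cut bitmasks from 2^(n-1)-1 down to 0, building each partition in one left-to-right scan.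
import Mathlib
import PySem

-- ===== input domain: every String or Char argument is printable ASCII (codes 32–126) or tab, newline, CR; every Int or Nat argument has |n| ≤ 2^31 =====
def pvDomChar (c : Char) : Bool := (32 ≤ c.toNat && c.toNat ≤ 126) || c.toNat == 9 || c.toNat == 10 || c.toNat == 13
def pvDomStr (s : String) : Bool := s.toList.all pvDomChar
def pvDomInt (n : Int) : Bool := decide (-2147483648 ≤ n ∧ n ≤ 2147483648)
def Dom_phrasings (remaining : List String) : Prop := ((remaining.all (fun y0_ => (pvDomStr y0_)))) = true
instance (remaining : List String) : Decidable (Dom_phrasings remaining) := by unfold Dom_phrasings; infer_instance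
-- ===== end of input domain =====

-- B enumerates gap-cut bitmasks iteratively instead of A's recursion over suffix partitions (same cost; alternative algorithm).

-- ===== PORT A =====
-- phrasingsLoop is the literal 'for i in range(len(remaining))' loop of A, with accumulator new_active_set.
mutual
def phrasings (remaining : List String) : List (List String) :=
  if remaining.length ≤ 1 then [remaining]
  else phrasingsLoop remaining 0 []
termination_by (remaining.length + 1, 0)
def phrasingsLoop (remaining : List String) (i : Nat) (acc : List (List String)) : List (List String) :=
  if i < remaining.length then
    phrasingsLoop remaining (i + 1)
      (acc ++ (phrasings (remaining.drop (i + 1))).map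
        (fun s => PySem.Str.join "_" (remaining.take (i + 1)) :: s))
  else acc
termination_by (remaining.length, remaining.length + 1 - i)
decreasing_by
  all_goals simp_all
  all_goals omega
end

-- ===== PORT B =====
-- build(cur, rest, mask): cur + '_' + x is ported as '_'.join([cur, x]) (exact: PySem.Str.join "_" [a, b] = a + "_" + b).
def pvBuild (cur : String) (rest : List String) (mask : Nat) : List String :=
  match rest with
  | [] => [cur]
  | x :: xs =>
    if (mask >>> xs.length) &&& 1 = 1 then cur :: pvBuild x xs mask
    else pvBuild (PySem.Str.join "_" [cur, x]) xs mask

-- reversed(range(2 ** (len(remaining) - 1))) → (List.range (2 ^ xs.length)).reverse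
def phrasings_alt (remaining : List String) : List (List String) :=
  match remaining with
  | [] => [[]]
  | x :: xs => ((List.range (2 ^ xs.length)).reverse).map (fun mask => pvBuild x xs mask)

-- ===== PRECONDITION & SPEC =====
def Spec_phrasings (remaining : List String) (out : List (List String)) : Prop := out = phrasings_alt remaining
instance (remaining : List String) (out : List (List String)) : Decidable (Spec_phrasings remaining out) := by unfold Spec_phrasings; infer_instance

-- ===== CLAIM (what is proved, stated in full; the proofs are below) =====
def Claim_equal_phrasings : Prop := ∀ (remaining : List String), Dom_phrasings remaining → Spec_phrasings remaining (phrasings remaining)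

-- ===== LEMMAS AND PROOFS =====

-- intermediate recursive description of A's output, parametrised by the phrase accumulated so far
def pvAg (cur : String) (rest : List String) : List (List String) :=
  match rest with
  | [] => [[cur]]
  | y :: ys => (pvAg y ys).map (cur :: ·) ++ pvAg (PySem.Str.join "_" [cur, y]) ys

theorem pv_join_join (c y : String) (l : List String) :
    PySem.Str.join "_" (PySem.Str.join "_" [c, y] :: l) = PySem.Str.join "_" (c :: y :: l) := by
  unfold PySem.Str.join
  congr 1
  cases l with
  | nil =>
      simp only [List.map_cons, List.map_nil, String.toList_ofList]
      rw [PySem.Chars.join_singleton]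
  | cons r rs =>
      simp only [List.map_cons, List.map_nil, String.toList_ofList,
        PySem.Chars.join_cons_cons, PySem.Chars.join_singleton, List.append_assoc]

theorem pv_join_single (c : String) : PySem.Str.join "_" [c] = c := by
  unfold PySem.Str.join
  simp only [List.map_cons, List.map_nil, PySem.Chars.join_singleton, String.ofList_toList]

theorem pv_loop_acc (r : List String) (i : Nat) (acc : List (List String)) :
    phrasingsLoop r i acc = acc ++ phrasingsLoop r i [] := by
  generalize hk : r.length - i = k
  induction k generalizing i acc with
  | zero =>
      rw [phrasingsLoop.eq_def]
      conv_rhs => rw [phrasingsLoop.eq_def]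
      rw [if_neg (by omega), if_neg (by omega)]
      simp
  | succ k ih =>
      rw [phrasingsLoop.eq_def]
      conv_rhs => rw [phrasingsLoop.eq_def]
      by_cases h : i < r.length
      · rw [if_pos h, if_pos h]
        rw [ih (i + 1) _ (by omega), ih (i + 1) (([] : List (List String)) ++ _) (by omega)]
        simp
      · rw [if_neg h, if_neg h]; simp

theorem pv_loop_shift (c y : String) (ys : List String) (i : Nat) :
    phrasingsLoop (c :: y :: ys) (i + 1) [] =
      phrasingsLoop (PySem.Str.join "_" [c, y] :: ys) i [] := by
  generalize hk : ys.length + 1 - i = k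
  induction k generalizing i with
  | zero =>
      rw [phrasingsLoop.eq_def]
      conv_rhs => rw [phrasingsLoop.eq_def]
      rw [if_neg (by simp only [List.length_cons]; omega),
          if_neg (by simp only [List.length_cons]; omega)]
  | succ k ih =>
      rw [phrasingsLoop.eq_def]
      conv_rhs => rw [phrasingsLoop.eq_def]
      by_cases h : i < ys.length + 1
      · rw [if_pos (by simp only [List.length_cons]; omega),
            if_pos (by simp only [List.length_cons]; omega)]
        simp only [List.drop_succ_cons, List.take_succ_cons, List.nil_append]
        rw [pv_join_join]
        rw [pv_loop_acc (c :: y :: ys) (i + 1 + 1),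
            pv_loop_acc (PySem.Str.join "_" [c, y] :: ys) (i + 1)]
        rw [ih (i + 1) (by omega)]
      · rw [if_neg (by simp only [List.length_cons]; omega),
            if_neg (by simp only [List.length_cons]; omega)]

theorem pv_phrasings_loop (c : String) (r : List String) :
    phrasings (c :: r) = phrasingsLoop (c :: r) 0 [] := by
  cases r with
  | nil =>
      rw [phrasings.eq_def, if_pos (by simp)]
      rw [phrasingsLoop.eq_def, if_pos (by simp)]
      rw [phrasingsLoop.eq_def, if_neg (by simp)]
      rw [phrasings.eq_def, if_pos (by simp)]
      simp [pv_join_single]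
  | cons y ys =>
      rw [phrasings.eq_def, if_neg (by simp)]

theorem pv_phrasings_eq_ag (r : List String) (c : String) :
    phrasings (c :: r) = pvAg c r := by
  induction r generalizing c with
  | nil =>
      rw [phrasings.eq_def, if_pos (by simp)]
      rfl
  | cons y ys ih =>
      rw [pv_phrasings_loop]
      rw [phrasingsLoop.eq_def, if_pos (by simp)]
      simp only [List.drop_succ_cons, List.drop_zero, List.take_succ_cons, List.take_zero,
        List.nil_append, zero_add]
      rw [pv_loop_acc, pv_join_single]
      rw [show (1 : Nat) = 0 + 1 from rfl, pv_loop_shift]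
      rw [← pv_phrasings_loop]
      rw [ih y, ih (PySem.Str.join "_" [c, y])]
      rfl

theorem pv_bit_high (n m : Nat) (h : m < 2 ^ n) : ((2 ^ n + m) >>> n) &&& 1 = 1 := by
  rw [Nat.shiftRight_eq_div_pow, Nat.and_one_is_mod, Nat.add_comm,
    Nat.add_div_right _ (Nat.two_pow_pos n), Nat.div_eq_of_lt h]

theorem pv_bit_low (n k m : Nat) (hk : k < n) :
    ((2 ^ n + m) >>> k) &&& 1 = (m >>> k) &&& 1 := by
  rw [Nat.shiftRight_eq_div_pow, Nat.shiftRight_eq_div_pow, Nat.and_one_is_mod,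
    Nat.and_one_is_mod]
  have h2 : (2 : Nat) ^ n = 2 ^ k * 2 ^ (n - k) := by
    rw [← pow_add]; congr 1; omega
  rw [h2, Nat.mul_add_div (Nat.two_pow_pos k)]
  have h3 : (2 : Nat) ^ (n - k) = 2 * 2 ^ (n - k - 1) := by
    rw [← pow_succ']; congr 1; omega
  omega

theorem pv_build_low (rest : List String) (c : String) (n m : Nat)
    (hlen : rest.length ≤ n) :
    pvBuild c rest (2 ^ n + m) = pvBuild c rest m := by
  induction rest generalizing c with
  | nil => rfl
  | cons x xs ih =>
      simp only [List.length_cons] at hlen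
      simp only [pvBuild]
      rw [pv_bit_low n xs.length m (by omega)]
      by_cases hb : (m >>> xs.length) &&& 1 = 1
      · rw [if_pos hb, if_pos hb, ih x (by omega)]
      · rw [if_neg hb, if_neg hb, ih _ (by omega)]

theorem pv_ag_eq_masks (r : List String) (c : String) :
    pvAg c r = ((List.range (2 ^ r.length)).reverse).map (fun mask => pvBuild c r mask) := by
  induction r generalizing c with
  | nil => rfl
  | cons x xs ih =>
      have hsplit : (2 : Nat) ^ (x :: xs).length = 2 ^ xs.length + 2 ^ xs.length := by
        simp only [List.length_cons, pow_succ]; omega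
      rw [pvAg, ih x, ih (PySem.Str.join "_" [c, x])]
      rw [hsplit, List.range_add, List.reverse_append, List.map_append]
      congr 1
      · rw [← List.map_reverse, List.map_map, List.map_map]
        apply List.map_congr_left
        intro m hm
        have hmlt : m < 2 ^ xs.length := by
          rw [List.mem_reverse, List.mem_range] at hm; exact hm
        simp only [Function.comp_apply, pvBuild]
        rw [if_pos (pv_bit_high xs.length m hmlt)]
        rw [pv_build_low xs x xs.length m (le_refl _)]
      · apply List.map_congr_left
        intro m hm
        have hmlt : m < 2 ^ xs.length := by
          rw [List.mem_reverse, List.mem_range] at hm; exact hm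
        have hz : m >>> xs.length = 0 := by
          rw [Nat.shiftRight_eq_div_pow]; exact Nat.div_eq_of_lt hmlt
        simp only [pvBuild, hz]
        rw [if_neg (by norm_num)]

theorem pv_main (remaining : List String) : phrasings remaining = phrasings_alt remaining := by
  cases remaining with
  | nil => rw [phrasings.eq_def, if_pos (by simp)]; rfl
  | cons x xs => rw [pv_phrasings_eq_ag, pv_ag_eq_masks]; rfl

-- ===== VERDICT (by name: the statement is the Claim_ definition above) =====
theorem phrasings_spec : Claim_equal_phrasings := by
  intro remaining _
  unfold Spec_phrasings
  exact pv_main remaining
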